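-- pv_equiv track=rewrite | github.com/CodeRayan26/Micro_Code_challenges | Day2/Encoding-Algo.py | custom_caesar_cipher_encrypt
-- ===== SOURCE A (Python) =====
-- def custom_caesar_cipher_encrypt(message):
--     def fibonacci(n):
--         if n == 0: return 0
--         elif n == 1: return 1
--         a, b = 0, 1
--         for _ in range(2, n + 1):
--             a, b = b, a + b
--         return b
--
--     encrypted_message = []
--     for i, char in enumerate(message):
--         if char == ' ':
--             encrypted_message.append(' ')
--             continue
--
--
--         shift = fibonacci(i)
--         new_char = chr(((ord(char) - ord('A') + shift) % 26) + ord('A'))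
--         encrypted_message.append(new_char)
--
--     return ''.join(encrypted_message)
-- ===== SOURCE B (Python) =====
-- def custom_caesar_cipher_encrypt(message):
--     # One pass: maintain the Fibonacci shift modulo 26 incrementally (O(n) vs A's O(n^2)).
--     out = []
--     a, b = 0, 1  # a = fib(i) % 26, b = fib(i+1) % 26
--     for char in message:
--         if char == ' ':
--             out.append(' ')
--         else:
--             out.append(chr((ord(char) - ord('A') + a) % 26 + ord('A')))
--         a, b = b, (a + b) % 26
--     return ''.join(out)
-- ===== Notes on version B (the rewrite author's own statement) =====
-- stated objective: faster
-- what changed: B computes the Fibonacci shift incrementally modulo 26 in a single pass instead of recomputing fibonacci(i) from scratch (with unbounded bignums) for every character.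
import Mathlib
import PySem

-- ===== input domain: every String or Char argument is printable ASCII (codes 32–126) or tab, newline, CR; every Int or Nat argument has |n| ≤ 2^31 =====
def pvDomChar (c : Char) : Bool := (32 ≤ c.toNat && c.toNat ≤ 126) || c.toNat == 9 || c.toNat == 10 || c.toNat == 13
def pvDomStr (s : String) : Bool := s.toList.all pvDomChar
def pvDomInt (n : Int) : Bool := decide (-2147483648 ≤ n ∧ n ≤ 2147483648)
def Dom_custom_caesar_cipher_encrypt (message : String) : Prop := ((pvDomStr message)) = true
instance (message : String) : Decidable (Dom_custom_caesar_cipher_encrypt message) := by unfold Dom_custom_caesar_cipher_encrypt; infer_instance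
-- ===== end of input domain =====

-- B replaces A's per-character from-scratch fibonacci(i) loop by one running Fibonacci pair
-- maintained modulo 26 across the single pass (objective: faster).

-- ===== PORT A =====
-- A's inner helper `fibonacci(n)`: loop over range(2, n+1) updating (a, b).
def pvFibonacciA (n : Int) : Int :=
  if n == 0 then 0
  else if n == 1 then 1
  else ((PySem.List.pyRange 2 (n + 1) 1).foldl
          (fun (p : Int × Int) _ => (p.2, p.1 + p.2)) (0, 1)).2

-- one iteration of A's `for i, char in enumerate(message)` body
def pvStepA (acc : List Char) (p : Int × Char) : List Char :=
  if p.2 = ' ' then acc ++ [' ']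
  else
    let shift := pvFibonacciA p.1
    acc ++ [Char.ofNat ((PySem.Int.mod ((p.2.toNat : Int) - 65 + shift) 26) + 65).toNat]

def custom_caesar_cipher_encrypt (message : String) : String :=
  String.ofList ((PySem.List.enumerate message.toList 0).foldl pvStepA [])

-- ===== PORT B =====
-- one iteration of B's loop: state = (out, a, b) with a, b the running Fibonacci pair mod 26
def pvStepB (st : List Char × Int × Int) (char : Char) : List Char × Int × Int :=
  let out := if char = ' ' then st.1 ++ [' ']
    else st.1 ++ [Char.ofNat ((PySem.Int.mod ((char.toNat : Int) - 65 + st.2.1) 26) + 65).toNat]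
  (out, st.2.2, PySem.Int.mod (st.2.1 + st.2.2) 26)

def custom_caesar_cipher_encrypt_alt (message : String) : String :=
  String.ofList (message.toList.foldl pvStepB ([], 0, 1)).1

-- ===== PRECONDITION & SPEC =====
def Spec_custom_caesar_cipher_encrypt (message : String) (out : String) : Prop := out = custom_caesar_cipher_encrypt_alt message
instance (message : String) (out : String) : Decidable (Spec_custom_caesar_cipher_encrypt message out) := by unfold Spec_custom_caesar_cipher_encrypt; infer_instance

-- ===== CLAIM (what is proved, stated in full; the proofs are below) =====
def Claim_equal_custom_caesar_cipher_encrypt : Prop := ∀ (message : String), Dom_custom_caesar_cipher_encrypt message → Spec_custom_caesar_cipher_encrypt message (custom_caesar_cipher_encrypt message)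

-- ===== LEMMAS AND PROOFS =====

-- A's fibonacci loop computes the Fibonacci pair
lemma pvFibLoop (m : Nat) :
    (PySem.List.pyRange 2 ((m : Int) + 2) 1).foldl
      (fun (p : Int × Int) _ => (p.2, p.1 + p.2)) (0, 1)
    = ((Nat.fib m : Int), (Nat.fib (m + 1) : Int)) := by
  induction m with
  | zero => simp [PySem.List.pyRange_one_eq_nil]
  | succ k ih =>
    have h : ((k : Int) + 1) + 2 = ((k : Int) + 2) + 1 := by ring
    rw [show ((k + 1 : Nat) : Int) = (k : Int) + 1 by push_cast; ring, h,
        PySem.List.pyRange_one_succ_right (by omega), List.foldl_append, ih]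
    simp only [List.foldl_cons, List.foldl_nil]
    rw [Nat.fib_add_two]
    push_cast
    ring_nf

lemma pvFibonacciA_eq (n : Nat) : pvFibonacciA (n : Int) = (Nat.fib n : Int) := by
  match n with
  | 0 => simp [pvFibonacciA]
  | 1 => simp [pvFibonacciA]
  | (m + 2) =>
    unfold pvFibonacciA
    have h1 : (((m + 2 : Nat) : Int) == 1) = false := by
      simp; omega
    have h0 : (((m + 2 : Nat) : Int) == 0) = false := by
      simp; omega
    rw [h0, h1]
    simp only [Bool.false_eq_true, if_false]
    rw [show ((m + 2 : Nat) : Int) + 1 = ((m + 1 : Nat) : Int) + 2 by push_cast; ring,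
        pvFibLoop (m + 1)]

-- the two loop bodies agree when B's state carries the Fibonacci pair mod 26
lemma pvStep_agree (acc : List Char) (c : Char) (s : Nat) :
    pvStepB (acc, (Nat.fib s : Int) % 26, (Nat.fib (s + 1) : Int) % 26) c
    = (pvStepA acc ((s : Int), c), (Nat.fib (s + 1) : Int) % 26, (Nat.fib (s + 2) : Int) % 26) := by
  have hfib : (Nat.fib (s + 2) : Int) = (Nat.fib s : Int) + (Nat.fib (s + 1) : Int) := by
    rw [Nat.fib_add_two]; push_cast; ring
  unfold pvStepA pvStepB
  rw [pvFibonacciA_eq]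
  simp only [PySem.Int.mod_eq_emod_of_pos (a := ((Nat.fib s : Int) % 26 + (Nat.fib (s+1) : Int) % 26)) (by norm_num : (0:Int) < 26)]
  have hbb : ((Nat.fib s : Int) % 26 + (Nat.fib (s+1) : Int) % 26) % 26 = (Nat.fib (s+2) : Int) % 26 := by omega
  have hchar : PySem.Int.mod ((c.toNat : Int) - 65 + (Nat.fib s : Int) % 26) 26
             = PySem.Int.mod ((c.toNat : Int) - 65 + (Nat.fib s : Int)) 26 := by
    rw [PySem.Int.mod_eq_emod_of_pos (by norm_num), PySem.Int.mod_eq_emod_of_pos (by norm_num)]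
    omega
  by_cases hc : c = ' '
  · simp [hc, hbb]
  · simp [hc, hbb, hchar]

-- main invariant: A's enumerate-fold from index s equals B's fold carrying (fib s % 26, fib (s+1) % 26)
lemma pvMain (cs : List Char) : ∀ (s : Nat) (acc : List Char),
    (PySem.List.enumerate cs (s : Int)).foldl pvStepA acc
    = (cs.foldl pvStepB (acc, (Nat.fib s : Int) % 26, (Nat.fib (s + 1) : Int) % 26)).1 := by
  induction cs with
  | nil => intro s acc; simp [PySem.List.enumerate_nil]
  | cons c cs ih =>
    intro s acc
    rw [PySem.List.enumerate_cons, List.foldl_cons, List.foldl_cons, pvStep_agree,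
        show (s : Int) + 1 = ((s + 1 : Nat) : Int) by push_cast; ring, ih (s + 1)]

-- ===== VERDICT (by name: the statement is the Claim_ definition above) =====
theorem custom_caesar_cipher_encrypt_spec : Claim_equal_custom_caesar_cipher_encrypt := by
  intro message _
  unfold Spec_custom_caesar_cipher_encrypt custom_caesar_cipher_encrypt custom_caesar_cipher_encrypt_alt
  have := pvMain message.toList 0 []
  norm_num at this
  rw [this]
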